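-- pv_equiv track=rewrite | github.com/pmall/ai-news-scraper | readonly_ai/utils.py | is_valid_webpage_url
-- ===== SOURCE A (Python) =====
-- def is_valid_webpage_url(url: str) -> bool:
--     """Check if URL is likely a webpage (not image, video, etc.)"""
--     if not url or not url.startswith(("http://", "https://")):
--         return False
--
--     # File extensions to exclude (not webpages)
--     excluded_extensions = {
--         ".jpg",
--         ".jpeg",
--         ".png",
--         ".gif",
--         ".webp",
--         ".svg",
--         ".bmp",  # Images
--         ".mp4",
--         ".avi",
--         ".mov",
--         ".mkv",
--         ".webm",
--         ".flv",  # Videos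
--         ".pdf",
--         ".doc",
--         ".docx",
--         ".ppt",
--         ".pptx",  # Documents
--         ".zip",
--         ".rar",
--         ".tar",
--         ".gz",  # Archives
--         ".mp3",
--         ".wav",
--         ".flac",
--         ".ogg",  # Audio
--     }
--
--     # Check file extension
--     parsed_url = url.lower().split("?")[0]  # Remove query parameters
--     for ext in excluded_extensions:
--         if parsed_url.endswith(ext):
--             return False
--
--     return True
-- ===== SOURCE B (Python) =====
-- _EXCLUDED_EXTENSIONS = {
--     ".jpg", ".jpeg", ".png", ".gif", ".webp", ".svg", ".bmp",
--     ".mp4", ".avi", ".mov", ".mkv", ".webm", ".flv",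
--     ".pdf", ".doc", ".docx", ".ppt", ".pptx",
--     ".zip", ".rar", ".tar", ".gz",
--     ".mp3", ".wav", ".flac", ".ogg",
-- }
--
--
-- def is_valid_webpage_url(url: str) -> bool:
--     """Check if URL is likely a webpage (not image, video, etc.)"""
--     if not url or not url.startswith(("http://", "https://")):
--         return False
--     parsed_url = url.lower().split("?")[0]
--     # One key extraction + one set lookup instead of scanning all extensions:
--     ext = "." + parsed_url.rsplit(".", 1)[-1]
--     return ext not in _EXCLUDED_EXTENSIONS
-- ===== Notes on version B (the rewrite author's own statement) =====
-- stated objective: simpler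
-- what changed: Instead of scanning all 26 excluded extensions with endswith, B extracts the URL's trailing extension once (suffix after the last dot, via rsplit) and does a single set membership test.
import Mathlib
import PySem

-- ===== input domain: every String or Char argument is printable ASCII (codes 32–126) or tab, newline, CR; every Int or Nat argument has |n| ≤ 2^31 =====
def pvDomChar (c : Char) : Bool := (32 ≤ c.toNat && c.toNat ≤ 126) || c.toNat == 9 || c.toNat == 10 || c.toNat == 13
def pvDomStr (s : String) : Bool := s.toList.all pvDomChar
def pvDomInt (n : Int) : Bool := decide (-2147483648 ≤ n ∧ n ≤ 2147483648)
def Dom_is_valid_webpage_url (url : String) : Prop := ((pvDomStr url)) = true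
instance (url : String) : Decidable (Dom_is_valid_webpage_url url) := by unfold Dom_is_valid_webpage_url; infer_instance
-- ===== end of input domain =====

-- B replaces A's scan over all 26 excluded extensions (endswith each) by extracting the
-- trailing extension once and doing a single set membership test; objective: simpler.

-- ===== PORT A =====
-- the excluded_extensions set literal (distinct elements; A's loop result is independent of
-- the set's iteration order, so iterating in literal order is exact)
def pvExcludedExtensions : List String :=
  [".jpg", ".jpeg", ".png", ".gif", ".webp", ".svg", ".bmp",
   ".mp4", ".avi", ".mov", ".mkv", ".webm", ".flv",
   ".pdf", ".doc", ".docx", ".ppt", ".pptx",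
   ".zip", ".rar", ".tar", ".gz",
   ".mp3", ".wav", ".flac", ".ogg"]

-- "for ext in excluded_extensions: if parsed_url.endswith(ext): return False" then "return True"
def pvCheckExts (parsed : List Char) : List String → Bool
  | [] => true
  | e :: rest => if PySem.Chars.endswith parsed e.toList then false else pvCheckExts parsed rest

def is_valid_webpage_url (url : String) : Bool :=
  if url.toList.isEmpty || !(PySem.Str.startswith url "http://" || PySem.Str.startswith url "https://") then
    false
  else
    -- parsed_url = url.lower().split("?")[0]  (split always yields ≥ 1 piece, so [0] = headD)
    let parsed : List Char := (PySem.Chars.splitOn (PySem.Chars.lower url.toList) ['?']).headD []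
    pvCheckExts parsed pvExcludedExtensions

-- ===== PORT B =====
def is_valid_webpage_url_alt (url : String) : Bool :=
  if url.toList.isEmpty || !(PySem.Str.startswith url "http://" || PySem.Str.startswith url "https://") then
    false
  else
    let parsed : List Char := (PySem.Chars.splitOn (PySem.Chars.lower url.toList) ['?']).headD []
    -- parsed_url.rsplit(".", 1)[-1]: the part after the last '.', or all of parsed if it has none (exact)
    let seg : List Char := (parsed.reverse.takeWhile (fun c => c != '.')).reverse
    -- "ext not in _EXCLUDED_EXTENSIONS"
    !(pvExcludedExtensions.any (fun e => ('.' :: seg) == e.toList))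

-- ===== PRECONDITION & SPEC =====
def Spec_is_valid_webpage_url (url : String) (out : Bool) : Prop := out = is_valid_webpage_url_alt url
instance (url : String) (out : Bool) : Decidable (Spec_is_valid_webpage_url url out) := by unfold Spec_is_valid_webpage_url; infer_instance

-- ===== CLAIM (what is proved, stated in full; the proofs are below) =====
def Claim_equal_is_valid_webpage_url : Prop := ∀ (url : String), Dom_is_valid_webpage_url url → Spec_is_valid_webpage_url url (is_valid_webpage_url url)

-- ===== LEMMAS AND PROOFS =====

-- splitOn.go prepends acc.reverse to its result
theorem pv_go_acc (sep : List Char) (fuel : Nat) :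
    ∀ (l cur : List Char) (acc : List (List Char)),
      ∃ res, PySem.Chars.splitOn.go sep fuel l cur acc = acc.reverse ++ res := by
  induction fuel with
  | zero =>
    intro l cur acc
    exact ⟨[cur.reverse ++ l], by simp [PySem.Chars.splitOn.go]⟩
  | succ fuel ih =>
    intro l cur acc
    cases l with
    | nil => exact ⟨[cur.reverse], by simp [PySem.Chars.splitOn.go]⟩
    | cons c rest =>
      by_cases h : sep.isPrefixOf (c :: rest) = true
      · obtain ⟨res, hres⟩ := ih (List.drop sep.length (c :: rest)) [] (cur.reverse :: acc)
        exact ⟨cur.reverse :: res, by simp [PySem.Chars.splitOn.go, h, hres]⟩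
      · obtain ⟨res, hres⟩ := ih rest (c :: cur) acc
        exact ⟨res, by simp [PySem.Chars.splitOn.go, h, hres]⟩

-- head of split("?") is everything before the first '?'
theorem pv_go_headD (fuel : Nat) :
    ∀ (l cur : List Char), l.length < fuel →
      (PySem.Chars.splitOn.go ['?'] fuel l cur []).headD [] = cur.reverse ++ l.takeWhile (fun c => c != '?') := by
  induction fuel with
  | zero => intro l cur h; omega
  | succ fuel ih =>
    intro l cur h
    cases l with
    | nil => simp [PySem.Chars.splitOn.go]
    | cons c rest =>
      by_cases hc : c = '?'
      · subst hc
        obtain ⟨res, hres⟩ := pv_go_acc ['?'] fuel rest [] [cur.reverse]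
        simp [PySem.Chars.splitOn.go, List.isPrefixOf, hres]
      · have hp : (['?'].isPrefixOf (c :: rest)) = false := by
          simp [List.isPrefixOf]; exact fun hcontra => hc hcontra.symm
        have ih' := ih rest (c :: cur) (by simpa using Nat.lt_of_succ_lt_succ h)
        simp at ih'
        simp [PySem.Chars.splitOn.go, hp, hc, ih']

theorem pv_splitOn_headD (l : List Char) :
    (PySem.Chars.splitOn l ['?']).headD [] = l.takeWhile (fun c => c != '?') := by
  have := pv_go_headD (l.length + 1) l [] (by omega)
  simpa [PySem.Chars.splitOn] using this

-- suffix by a dot-extension ↔ the trailing segment (after the last dot) is exactly that extension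
theorem pv_key_prefix (a r : List Char) (hdot : '.' ∉ a) (hlen : a.length < r.length) :
    (a ++ ['.'] <+: r) ↔ r.takeWhile (fun c => c != '.') = a := by
  constructor
  · rintro ⟨t, rfl⟩
    rw [List.append_assoc, List.takeWhile_append]
    simp
    exact fun _ x hx hxe => hdot (hxe ▸ hx)
  · intro h
    have hsplit := List.takeWhile_append_dropWhile (p := fun c => c != '.') (l := r)
    cases hd : r.dropWhile (fun c => c != '.') with
    | nil =>
      rw [hd, h] at hsplit
      simp at hsplit
      rw [← hsplit] at hlen; omega
    | cons c t =>
      have hc : (fun c => c != '.') c = false := by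
        have := List.head_dropWhile_not (p := fun c => c != '.') (l := r)
        rw [hd] at this; simpa using this (by simp)
      have hc' : c = '.' := by simpa using hc
      refine ⟨t, ?_⟩
      rw [← hsplit, h, hd, hc']
      simp

theorem pv_endswith_eq_key (l cs : List Char) (hdot : '.' ∉ cs) (hlen : cs.length < l.length) :
    PySem.Chars.endswith l ('.' :: cs)
      = (('.' :: (l.reverse.takeWhile (fun c => c != '.')).reverse : List Char) == ('.' :: cs)) := by
  have h1 : PySem.Chars.endswith l ('.' :: cs) = true ↔ ('.' :: cs) <:+ l := PySem.Chars.endswith_iff l ('.' :: cs)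
  have h2 : ('.' :: cs) <:+ l ↔ cs.reverse ++ ['.'] <+: l.reverse := by
    rw [← List.reverse_prefix]
    simp
  have h3 : cs.reverse ++ ['.'] <+: l.reverse ↔ l.reverse.takeWhile (fun c => c != '.') = cs.reverse := by
    apply pv_key_prefix
    · simpa using hdot
    · simpa using hlen
  have h4 : (('.' :: (l.reverse.takeWhile (fun c => c != '.')).reverse : List Char) == ('.' :: cs)) = true
      ↔ l.reverse.takeWhile (fun c => c != '.') = cs.reverse := by
    simp [List.reverse_eq_iff]
  rw [Bool.eq_iff_iff, h1, h2, h3, h4]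

-- per-extension instance of the key equivalence, stated on the string literal
theorem pv_ext_case (l : List Char) (hl : 5 ≤ l.length) (e : String)
    (hhead : e.toList.headD ' ' = '.') (hd : '.' ∉ e.toList.tail)
    (hcl : 0 < e.toList.length ∧ e.toList.tail.length < 5) :
    PySem.Chars.endswith l e.toList
      = (('.' :: (l.reverse.takeWhile (fun c => c != '.')).reverse : List Char) == e.toList) := by
  cases he : e.toList with
  | nil => rw [he] at hcl; simp at hcl
  | cons c cs =>
    rw [he] at hhead hd hcl
    have hc : c = '.' := by simpa using hhead
    rw [hc]
    exact pv_endswith_eq_key l cs (by simpa using hd)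
      (lt_of_lt_of_le (by simpa using hcl.2) hl)

-- pointwise-on-members congruence for List.any
theorem pv_any_congr {α : Type} (l : List α) (f g : α → Bool)
    (h : ∀ a ∈ l, f a = g a) : l.any f = l.any g := by
  induction l with
  | nil => rfl
  | cons a t ih =>
    simp only [List.any_cons, h a (by simp)]
    rw [ih (fun b hb => h b (by simp [hb]))]

-- A's loop is the negated any
theorem pv_loop_eq_not_any (parsed : List Char) (exts : List String) :
    pvCheckExts parsed exts = !(exts.any (fun e => PySem.Chars.endswith parsed e.toList)) := by
  induction exts with
  | nil => simp [pvCheckExts]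
  | cons e rest ih =>
    by_cases h : PySem.Chars.endswith parsed e.toList = true
    · simp [pvCheckExts, h]
    · simp only [Bool.not_eq_true] at h
      simp [pvCheckExts, h, ih]

-- a '?'-free prefix survives the takeWhile, so its length bounds the head piece
theorem pv_len_le (p l : List Char) (hp : p <+: l)
    (hq : List.takeWhile (fun c => c != '?') p = p) :
    p.length ≤ (List.takeWhile (fun c => c != '?') l).length := by
  obtain ⟨t, rfl⟩ := hp
  rw [List.takeWhile_append, if_pos (by rw [hq])]
  simp

-- any url passing the guard yields a parsed prefix of length ≥ 5
theorem pv_parsed_len (url : String)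
    (h : PySem.Chars.startswith url.toList ("http://".toList) = true
       ∨ PySem.Chars.startswith url.toList ("https://".toList) = true) :
    5 ≤ ((PySem.Chars.splitOn (PySem.Chars.lower url.toList) ['?']).headD []).length := by
  rw [pv_splitOn_headD]
  have step : ∀ p : List Char, p <+: url.toList → p.map PySem.Chars.lowerChar = p →
      List.takeWhile (fun c => c != '?') p = p → p.length = 5 →
      5 ≤ (List.takeWhile (fun c => c != '?') (PySem.Chars.lower url.toList)).length := by
    intro p hp hmap hq hl5
    have hlow : p <+: PySem.Chars.lower url.toList := by
      have hm := hp.map PySem.Chars.lowerChar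
      rw [hmap] at hm
      simpa [PySem.Chars.lower] using hm
    have := pv_len_le p _ hlow hq
    omega
  rcases h with h | h
  · have hpre := (PySem.Chars.startswith_iff url.toList ("http://".toList)).mp h
    exact step "http:".toList (List.IsPrefix.trans (by decide) hpre) (by decide) (by decide) (by decide)
  · have hpre := (PySem.Chars.startswith_iff url.toList ("https://".toList)).mp h
    exact step "https".toList (List.IsPrefix.trans (by decide) hpre) (by decide) (by decide) (by decide)

-- ===== VERDICT (by name: the statement is the Claim_ definition above) =====
theorem is_valid_webpage_url_spec : Claim_equal_is_valid_webpage_url := by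
  intro url _
  unfold Spec_is_valid_webpage_url is_valid_webpage_url is_valid_webpage_url_alt
  split_ifs with h
  · rfl
  · simp at h
    have hsw : PySem.Chars.startswith url.toList ("http://".toList) = true
        ∨ PySem.Chars.startswith url.toList ("https://".toList) = true := by
      cases h1 : PySem.Chars.startswith url.toList ("http://".toList) with
      | true => exact Or.inl rfl
      | false => exact Or.inr (h.2 h1)
    have hlen := pv_parsed_len url hsw
    simp only [pv_loop_eq_not_any]
    set X := (PySem.Chars.splitOn (PySem.Chars.lower url.toList) ['?']).headD [] with hX
    have hcong : ∀ e ∈ pvExcludedExtensions,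
        PySem.Chars.endswith X e.toList
          = (('.' :: (X.reverse.takeWhile (fun c => c != '.')).reverse : List Char) == e.toList) := by
      intro e he
      fin_cases he <;> exact pv_ext_case X hlen _ (by decide) (by decide) (by decide)
    rw [pv_any_congr _ _ _ hcong]
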